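-- pv_equiv track=rewrite | github.com/rahulmehta25/Smart-Legal-Contracts | backend/app/ai/contract_generator.py | _check_logical_conflict
-- ===== SOURCE A (Python) =====
-- def _check_logical_conflict(clause1: str, clause2: str) -> bool:
--     """Check for logical conflicts between clauses."""
--     # Extract key terms
--     clause1_lower = clause1.lower()
--     clause2_lower = clause2.lower()
--
--     # Check for contradictory terms
--     contradictions = [
--         ("shall", "shall not"),
--         ("must", "must not"),
--         ("required", "prohibited"),
--         ("exclusive", "non-exclusive"),
--         ("binding", "non-binding"),
--         ("confidential", "public"),
--         ("perpetual", "temporary"),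
--         ("unlimited", "limited")
--     ]
--
--     for term1, term2 in contradictions:
--         if term1 in clause1_lower and term2 in clause2_lower:
--             return True
--         if term2 in clause1_lower and term1 in clause2_lower:
--             return True
--
--     return False
-- ===== SOURCE B (Python) =====
-- def _check_logical_conflict(clause1: str, clause2: str) -> bool:
--     """Check for logical conflicts between clauses."""
--     contradictions = [
--         ("shall", "shall not"),
--         ("must", "must not"),
--         ("required", "prohibited"),
--         ("exclusive", "non-exclusive"),
--         ("binding", "non-binding"),
--         ("confidential", "public"),
--         ("perpetual", "temporary"),
--         ("unlimited", "limited")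
--     ]
--
--     def hit_indices(clause, side):
--         lowered = clause.lower()
--         return {i for i, pair in enumerate(contradictions) if pair[side] in lowered}
--
--     fwd1, rev1 = hit_indices(clause1, 0), hit_indices(clause1, 1)
--     fwd2, rev2 = hit_indices(clause2, 0), hit_indices(clause2, 1)
--     return bool((fwd1 & rev2) or (rev1 & fwd2))
-- ===== Notes on version B (the rewrite author's own statement) =====
-- stated objective: alternative
-- what changed: B reduces the problem to set algebra on pair indices: for each clause it builds the index sets of pairs whose forward/reverse term occurs in it, then answers by whether the intersections fwd1&rev2 or rev1&fwd2 are nonempty; there is no pairwise early-return loop at all.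
import Mathlib
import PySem

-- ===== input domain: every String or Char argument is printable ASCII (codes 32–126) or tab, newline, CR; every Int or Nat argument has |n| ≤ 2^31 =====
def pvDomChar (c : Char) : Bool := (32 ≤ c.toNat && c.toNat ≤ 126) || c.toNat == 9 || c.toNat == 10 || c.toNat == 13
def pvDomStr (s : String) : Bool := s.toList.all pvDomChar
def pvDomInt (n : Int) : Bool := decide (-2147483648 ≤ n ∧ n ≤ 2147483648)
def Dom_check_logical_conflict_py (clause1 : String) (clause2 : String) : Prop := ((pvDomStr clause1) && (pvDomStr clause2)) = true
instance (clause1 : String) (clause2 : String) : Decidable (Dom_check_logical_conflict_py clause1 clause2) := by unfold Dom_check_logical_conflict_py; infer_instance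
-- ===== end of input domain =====

-- B replaces A's pairwise early-return loop by set algebra on pair indices (intersections of hit-index sets); alternative decomposition, same cost.

-- ===== PORT A =====
-- the literal contradiction pair list from A
def pvContradictions : List (String × String) :=
  [("shall", "shall not"), ("must", "must not"), ("required", "prohibited"),
   ("exclusive", "non-exclusive"), ("binding", "non-binding"),
   ("confidential", "public"), ("perpetual", "temporary"), ("unlimited", "limited")]

-- A's for-loop with early returns, as structural recursion over the pair list
def pvLoopA (l1 l2 : String) : List (String × String) → Bool
  | [] => false
  | (t1, t2) :: rest =>
    if PySem.Str.isIn t1 l1 && PySem.Str.isIn t2 l2 then true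
    else if PySem.Str.isIn t2 l1 && PySem.Str.isIn t1 l2 then true
    else pvLoopA l1 l2 rest

def check_logical_conflict_py (clause1 : String) (clause2 : String) : Bool :=
  let clause1_lower := PySem.Str.lower clause1
  let clause2_lower := PySem.Str.lower clause2
  pvLoopA clause1_lower clause2_lower pvContradictions

-- ===== PORT B =====
-- Source B's hit_indices: the set of pair indices whose term on the given side occurs in the clause
def pvHitIndices (clause : String) (side : Nat) : PySem.Set Int :=
  let lowered := PySem.Str.lower clause
  PySem.Set.ofList (((PySem.List.enumerate pvContradictions).filter
    (fun ip => PySem.Str.isIn (if side = 0 then ip.2.1 else ip.2.2) lowered)).map (fun ip => ip.1))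

def check_logical_conflict_py_alt (clause1 : String) (clause2 : String) : Bool :=
  let fwd1 := pvHitIndices clause1 0
  let rev1 := pvHitIndices clause1 1
  let fwd2 := pvHitIndices clause2 0
  let rev2 := pvHitIndices clause2 1
  -- bool((fwd1 & rev2) or (rev1 & fwd2)): a Python set is truthy iff nonempty
  !(PySem.Set.inter fwd1 rev2).isEmpty || !(PySem.Set.inter rev1 fwd2).isEmpty

-- ===== PRECONDITION & SPEC =====
def Spec_check_logical_conflict_py (clause1 : String) (clause2 : String) (out : Bool) : Prop := out = check_logical_conflict_py_alt clause1 clause2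
instance (clause1 : String) (clause2 : String) (out : Bool) : Decidable (Spec_check_logical_conflict_py clause1 clause2 out) := by unfold Spec_check_logical_conflict_py; infer_instance

-- ===== CLAIM (what is proved, stated in full; the proofs are below) =====
def Claim_equal_check_logical_conflict_py : Prop := ∀ (clause1 : String) (clause2 : String), Dom_check_logical_conflict_py clause1 clause2 → Spec_check_logical_conflict_py clause1 clause2 (check_logical_conflict_py clause1 clause2)

-- ===== LEMMAS AND PROOFS =====

-- membership in a hit-index set is the substring test at that pair index
theorem pv_mem_hitIndices (clause : String) (side : Nat) (k : Nat) (hk : k < pvContradictions.length) :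
    ((k : Int) ∈ pvHitIndices clause side) ↔
      PySem.Str.isIn (if side = 0 then pvContradictions[k].1 else pvContradictions[k].2)
        (PySem.Str.lower clause) = true := by
  unfold pvHitIndices
  simp only [PySem.Set.mem_ofList, List.mem_map, List.mem_filter,
    PySem.List.mem_enumerate_iff]
  constructor
  · rintro ⟨⟨i, p⟩, ⟨⟨j, hj, hij⟩, hisin⟩, hfst⟩
    obtain ⟨h1, h2⟩ := Prod.mk.injEq .. ▸ hij
    simp only at hfst
    have : j = k := by omega
    subst this; subst h2; simpa using hisin
  · intro h
    refine ⟨((k : Int), pvContradictions[k]), ⟨⟨k, hk, by simp⟩, by simpa using h⟩, rfl⟩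

-- a Set intersection is nonempty iff some element is in both
theorem pv_inter_nonempty (s t : PySem.Set Int) :
    (!(PySem.Set.inter s t).isEmpty) = true ↔ ∃ x, x ∈ s ∧ x ∈ t := by
  rw [Bool.not_eq_eq_eq_not, Bool.not_true, List.isEmpty_eq_false_iff_exists_mem]
  simp [PySem.Set.mem_inter]

-- A's loop is any over the pair predicate
theorem pvLoopA_eq_any (l1 l2 : String) (l : List (String × String)) :
    pvLoopA l1 l2 l = l.any (fun p =>
      (PySem.Str.isIn p.1 l1 && PySem.Str.isIn p.2 l2) ||
      (PySem.Str.isIn p.2 l1 && PySem.Str.isIn p.1 l2)) := by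
  induction l with
  | nil => simp [pvLoopA]
  | cons hd tl ih =>
    obtain ⟨t1, t2⟩ := hd
    simp only [pvLoopA, List.any_cons, ih]
    split_ifs with h1 h2 <;> simp_all

-- ===== VERDICT (by name: the statement is the Claim_ definition above) =====
theorem check_logical_conflict_py_spec : Claim_equal_check_logical_conflict_py := by
  unfold Claim_equal_check_logical_conflict_py
  intro clause1 clause2 _
  unfold Spec_check_logical_conflict_py check_logical_conflict_py check_logical_conflict_py_alt
  simp only [pvLoopA_eq_any]
  rw [Bool.eq_iff_iff, Bool.or_eq_true, pv_inter_nonempty, pv_inter_nonempty, List.any_eq_true]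
  constructor
  · rintro ⟨p, hp, hc⟩
    obtain ⟨k, hk, rfl⟩ := List.mem_iff_getElem.mp hp
    rcases Bool.or_eq_true_iff.mp hc with h | h <;>
      obtain ⟨ha, hb⟩ := Bool.and_eq_true_iff.mp h
    · exact Or.inl ⟨(k : Int),
        (pv_mem_hitIndices clause1 0 k hk).mpr (by simpa using ha),
        (pv_mem_hitIndices clause2 1 k hk).mpr (by simpa using hb)⟩
    · exact Or.inr ⟨(k : Int),
        (pv_mem_hitIndices clause1 1 k hk).mpr (by simpa using ha),
        (pv_mem_hitIndices clause2 0 k hk).mpr (by simpa using hb)⟩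
  · have shape : ∀ (c : String) (sd : Nat) (x : Int), x ∈ pvHitIndices c sd →
        ∃ k : Nat, k < pvContradictions.length ∧ x = (k : Int) := by
      intro c sd x hx
      unfold pvHitIndices at hx
      simp only [PySem.Set.mem_ofList, List.mem_map, List.mem_filter,
        PySem.List.mem_enumerate_iff] at hx
      obtain ⟨⟨i, p⟩, ⟨⟨j, hj, hij⟩, _⟩, hfst⟩ := hx
      obtain ⟨h1, _⟩ := Prod.mk.injEq .. ▸ hij
      exact ⟨j, hj, by simp only at hfst; omega⟩
    rintro (⟨x, hx1, hx2⟩ | ⟨x, hx1, hx2⟩)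
    · obtain ⟨k, hk, rfl⟩ := shape _ _ _ hx1
      have h1 := (pv_mem_hitIndices _ 0 k hk).mp hx1
      have h2 := (pv_mem_hitIndices _ 1 k hk).mp hx2
      refine ⟨pvContradictions[k], List.getElem_mem hk, ?_⟩
      simp at h1 h2 ⊢
      exact Or.inl ⟨h1, h2⟩
    · obtain ⟨k, hk, rfl⟩ := shape _ _ _ hx1
      have h1 := (pv_mem_hitIndices _ 1 k hk).mp hx1
      have h2 := (pv_mem_hitIndices _ 0 k hk).mp hx2
      refine ⟨pvContradictions[k], List.getElem_mem hk, ?_⟩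
      simp at h1 h2 ⊢
      exact Or.inr ⟨h1, h2⟩
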